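-- pv_equiv track=rewrite | github.com/ohoon/programmers_ex | level2/124_나라의_숫자.py | solution
-- ===== SOURCE A (Python) =====
-- def solution(n):
--     pattern = ['1', '2' ,'4']
--     answer = ""
--
--     while (n > 0):
--         n -= 1
--         answer = pattern[n % 3] + answer
--         n //= 3
--
--     return answer
-- ===== SOURCE B (Python) =====
-- def solution(n):
--     if n <= 0:
--         return ""
--     return solution((n - 1) // 3) + "124"[(n - 1) % 3]
-- ===== Notes on version B (the rewrite author's own statement) =====
-- stated objective: simpler
-- what changed: Replaces the while loop that prepends digits onto an accumulator with a direct recursion on the quotient that appends each digit on the unwind.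
import Mathlib
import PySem

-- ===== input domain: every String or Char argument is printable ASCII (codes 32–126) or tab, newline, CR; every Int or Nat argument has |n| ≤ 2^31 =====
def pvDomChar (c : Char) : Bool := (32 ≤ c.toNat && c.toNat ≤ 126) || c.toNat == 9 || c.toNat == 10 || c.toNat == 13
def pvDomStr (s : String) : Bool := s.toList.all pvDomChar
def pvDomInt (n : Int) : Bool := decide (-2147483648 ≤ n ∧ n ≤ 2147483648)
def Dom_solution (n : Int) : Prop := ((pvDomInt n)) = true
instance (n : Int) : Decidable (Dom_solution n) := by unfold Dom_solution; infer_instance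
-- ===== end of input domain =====

-- B rewrites A's digit-prepending while loop as a direct recursion on the quotient that
-- appends each digit on the unwind (objective: simpler).

-- ===== PORT A =====
-- the while loop of A, state (n, answer); pattern[n % 3] is the in-range list index
def solutionLoop (n : Int) (answer : String) : String :=
  if n > 0 then
    solutionLoop (PySem.Int.floordiv (n - 1) 3)
      ((PySem.List.pyGet? ["1", "2", "4"] (PySem.Int.mod (n - 1) 3)).getD "" ++ answer)
  else answer
termination_by n.toNat
decreasing_by
  rw [PySem.Int.floordiv_eq_ediv_of_pos (by omega : (0:Int) < 3)]
  omega

def solution (n : Int) : String := solutionLoop n ""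

-- ===== PORT B =====
-- B: recursion over the same recurrence; "124"[(n-1) % 3] is the in-range string index
def solution_alt (n : Int) : String :=
  if n ≤ 0 then ""
  else solution_alt (PySem.Int.floordiv (n - 1) 3)
        ++ String.ofList [(PySem.Str.pyGet? "124" (PySem.Int.mod (n - 1) 3)).getD ' ']
termination_by n.toNat
decreasing_by
  rw [PySem.Int.floordiv_eq_ediv_of_pos (by omega : (0:Int) < 3)]
  omega

-- ===== PRECONDITION & SPEC =====
def Spec_solution (n : Int) (out : String) : Prop := out = solution_alt n
instance (n : Int) (out : String) : Decidable (Spec_solution n out) := by unfold Spec_solution; infer_instance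

-- ===== CLAIM (what is proved, stated in full; the proofs are below) =====
def Claim_equal_solution : Prop := ∀ (n : Int), Dom_solution n → Spec_solution n (solution n)

-- ===== LEMMAS AND PROOFS =====
theorem digit_eq (i : Int) (h0 : 0 ≤ i) (h3 : i < 3) :
    (PySem.List.pyGet? ["1", "2", "4"] i).getD "" =
      String.ofList [(PySem.Str.pyGet? "124" i).getD ' '] := by
  interval_cases i <;> decide

theorem loop_eq_alt (n : Int) (acc : String) : solutionLoop n acc = solution_alt n ++ acc := by
  by_cases h : n > 0
  · rw [solutionLoop, if_pos h, solution_alt, if_neg (by omega : ¬ n ≤ 0)]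
    rw [loop_eq_alt (PySem.Int.floordiv (n - 1) 3)]
    rw [digit_eq _ (PySem.Int.mod_nonneg _ (by omega)) (PySem.Int.mod_lt _ (by omega))]
    rw [String.append_assoc]
  · rw [solutionLoop, if_neg h, solution_alt, if_pos (by omega : n ≤ 0)]
    simp
termination_by n.toNat
decreasing_by
  rw [PySem.Int.floordiv_eq_ediv_of_pos (by omega : (0:Int) < 3)]
  omega

-- ===== VERDICT (by name: the statement is the Claim_ definition above) =====
theorem solution_spec : Claim_equal_solution := by
  intro n _
  unfold Spec_solution solution
  rw [loop_eq_alt]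
  simp
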